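-- pv_equiv track=rewrite | github.com/darsagent/DARS-Agent | reviewer/evaluation/utils.py | remove_comments_from_code_line
-- ===== SOURCE A (Python) =====
-- def remove_comments_from_code_line(line):
--     code = ''
--     in_string = None
--     i = 0
--     n = len(line)
--     while i < n:
--         c = line[i]
--         if in_string:
--             code += c
--             if c == in_string and line[i-1] != '\\':
--                 in_string = None
--             i +=1
--         else:
--             if c == '"' or c == "'":
--                 in_string = c
--                 code += c
--                 i +=1
--             elif c == '#':
--                 # Start of comment
--                 break
--             else:
--                 code += c
--                 i +=1
--     return code.rstrip()
-- ===== SOURCE B (Python) =====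
-- def remove_comments_from_code_line(line):
--     n = len(line)
--     cut = n
--     pos = 0
--     while pos < n:
--         h = line.find('#', pos)
--         if h == -1:
--             h = n
--         q1 = line.find("'", pos)
--         q2 = line.find('"', pos)
--         if q1 == -1 and q2 == -1:
--             q = n
--         elif q1 == -1:
--             q = q2
--         elif q2 == -1:
--             q = q1
--         else:
--             q = min(q1, q2)
--         if h < q:
--             cut = h
--             break
--         if q == n:
--             break
--         quote = line[q]
--         k = line.find(quote, q + 1)
--         while k != -1 and line[k - 1] == '\\':
--             k = line.find(quote, k + 1)
--         if k == -1:
--             break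
--         pos = k + 1
--     return line[:cut].rstrip()
-- ===== Notes on version B (the rewrite author's own statement) =====
-- stated objective: faster
-- what changed: B replaces A's per-character state machine with its growing output buffer by segment jumps using str.find: it repeatedly locates the next comment marker or quote character, skips entire string literals by chasing unescaped closing quotes, records only the cut index, and slices the line once at the end.
import Mathlib
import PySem

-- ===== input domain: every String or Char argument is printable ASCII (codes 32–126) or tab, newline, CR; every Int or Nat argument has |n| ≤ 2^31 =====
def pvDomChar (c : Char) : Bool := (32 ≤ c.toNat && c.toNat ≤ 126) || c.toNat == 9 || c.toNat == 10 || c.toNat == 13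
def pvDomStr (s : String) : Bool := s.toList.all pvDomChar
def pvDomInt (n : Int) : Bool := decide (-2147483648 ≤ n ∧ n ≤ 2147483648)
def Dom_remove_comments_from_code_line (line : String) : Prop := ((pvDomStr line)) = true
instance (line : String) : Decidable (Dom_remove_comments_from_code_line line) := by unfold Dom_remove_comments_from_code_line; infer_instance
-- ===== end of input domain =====

-- B replaces A's per-character state-machine with segment jumps via str.find: it locates the
-- next '#' / quote, skips whole string literals (chasing unescaped closing quotes with find),
-- and finally slices once (objective: alternative decomposition, no output buffer).

-- ===== PORT A =====
-- A's while-loop: state (code, in_string, i); each iteration appends to code or breaks on '#'.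
def pvLoopA (l : List Char) (code : List Char) (ins : Option Char) (i : Nat) : List Char :=
  if h : i < l.length then
    match ins with
    | some q =>
      -- line[i-1] via Python indexing (negative wraps), as in A
      pvLoopA l (code ++ [l[i]])
        (if l[i] = q ∧ PySem.List.pyGet? l ((i : Int) - 1) ≠ some '\\' then none else some q) (i + 1)
    | none =>
      if l[i] = '"' ∨ l[i] = '\'' then pvLoopA l (code ++ [l[i]]) (some l[i]) (i + 1)
      else if l[i] = '#' then code
      else pvLoopA l (code ++ [l[i]]) none (i + 1)
  else code
termination_by l.length - i

def remove_comments_from_code_line (line : String) : String :=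
  PySem.Str.rstrip (String.ofList (pvLoopA line.toList [] none 0))

-- ===== PORT B =====
-- line.find(c, i): first index ≥ i holding c; none encodes Python's -1.
def pvFindFrom (l : List Char) (c : Char) (i : Nat) : Option Nat :=
  if h : i < l.length then
    if l[i] = c then some i else pvFindFrom l c (i + 1)
  else none
termination_by l.length - i

theorem pvFindFrom_some_ge (l : List Char) (c : Char) (i m : Nat)
    (h : pvFindFrom l c i = some m) : i ≤ m ∧ m < l.length := by
  unfold pvFindFrom at h
  split at h
  · split at h
    · cases h; omega
    · have := pvFindFrom_some_ge l c (i + 1) m h; omega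
  · cases h
termination_by l.length - i

-- Source B's inner while: chase find(quote, ·) past candidates whose previous char is '\'.
def pvSkipClose (l : List Char) (q : Char) (k : Nat) : Option Nat :=
  match h : pvFindFrom l q k with
  | none => none
  | some m =>
    if PySem.List.pyGet? l ((m : Int) - 1) = some '\\' then pvSkipClose l q (m + 1)
    else some m
termination_by l.length - k
decreasing_by have := pvFindFrom_some_ge l q k m h; omega

theorem pvSkipClose_some_ge (l : List Char) (q : Char) (k m : Nat)
    (h : pvSkipClose l q k = some m) : k ≤ m ∧ m < l.length := by
  fun_induction pvSkipClose l q k with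
  | case1 => cases h
  | case2 k m' hf hesc ih =>
      have := pvFindFrom_some_ge l q k m' hf
      have := ih h
      omega
  | case3 k m' hf hesc =>
      injection h with h2
      have := pvFindFrom_some_ge l q k m' hf
      omega

-- the q computed by Source B's if-chain: first quote position ≥ pos, n if none
def pvMinQuote (l : List Char) (pos : Nat) : Nat :=
  match pvFindFrom l '\'' pos, pvFindFrom l '"' pos with
  | none, none => l.length
  | some a, none => a
  | none, some b => b
  | some a, some b => min a b

theorem pvMinQuote_ge (l : List Char) (pos : Nat) (h : pos ≤ l.length) :
    pos ≤ pvMinQuote l pos := by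
  unfold pvMinQuote
  rcases ha : pvFindFrom l '\'' pos with _ | a <;> rcases hb : pvFindFrom l '"' pos with _ | b <;>
    simp only [ha, hb]
  · simpa using h
  · simpa using (pvFindFrom_some_ge _ _ _ _ hb).1
  · simpa using (pvFindFrom_some_ge _ _ _ _ ha).1
  · simpa using le_min (pvFindFrom_some_ge _ _ _ _ ha).1 (pvFindFrom_some_ge _ _ _ _ hb).1

-- Source B's outer while: returns the cut position (n on the 'break's that leave cut = n).
def pvCutB (l : List Char) (pos : Nat) : Nat :=
  if _hpos : pos < l.length then
    if (pvFindFrom l '#' pos).getD l.length < pvMinQuote l pos then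
      (pvFindFrom l '#' pos).getD l.length
    else if pvMinQuote l pos = l.length then l.length
    else
      match hk : pvSkipClose l (l.getD (pvMinQuote l pos) ' ') (pvMinQuote l pos + 1) with
      | none => l.length
      | some k => pvCutB l (k + 1)
  else l.length
termination_by l.length - pos
decreasing_by
  have h1 := pvSkipClose_some_ge l (l.getD (pvMinQuote l pos) ' ') (pvMinQuote l pos + 1) k hk
  have h2 := pvMinQuote_ge l pos (by omega)
  omega

def remove_comments_from_code_line_alt (line : String) : String :=
  PySem.Str.rstrip (String.ofList (line.toList.take (pvCutB line.toList 0)))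

-- ===== PRECONDITION & SPEC =====
def Spec_remove_comments_from_code_line (line : String) (out : String) : Prop := out = remove_comments_from_code_line_alt line
instance (line : String) (out : String) : Decidable (Spec_remove_comments_from_code_line line out) := by unfold Spec_remove_comments_from_code_line; infer_instance

-- ===== CLAIM (what is proved, stated in full; the proofs are below) =====
def Claim_equal_remove_comments_from_code_line : Prop := ∀ (line : String), Dom_remove_comments_from_code_line line → Spec_remove_comments_from_code_line line (remove_comments_from_code_line line)

-- ===== LEMMAS AND PROOFS =====

theorem pvSkipClose_unfold (l : List Char) (q : Char) (k : Nat) :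
    pvSkipClose l q k =
      match pvFindFrom l q k with
      | none => none
      | some m =>
        if PySem.List.pyGet? l ((m : Int) - 1) = some '\\' then pvSkipClose l q (m + 1)
        else some m := by
  conv_lhs => unfold pvSkipClose
  split
  · rename_i heq; rw [heq]
  · rename_i m heq; rw [heq]

-- Reference cut machine: A's per-character scan, recording only the cut index.
def pvRef (l : List Char) (ins : Option Char) (i : Nat) : Nat :=
  if h : i < l.length then
    match ins with
    | some q =>
      pvRef l
        (if l[i] = q ∧ PySem.List.pyGet? l ((i : Int) - 1) ≠ some '\\' then none else some q) (i + 1)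
    | none =>
      if l[i] = '"' ∨ l[i] = '\'' then pvRef l (some l[i]) (i + 1)
      else if l[i] = '#' then i
      else pvRef l none (i + 1)
  else l.length
termination_by l.length - i

theorem pvRef_stop (l : List Char) (ins : Option Char) (i : Nat) (h : l.length ≤ i) :
    pvRef l ins i = l.length := by
  unfold pvRef
  split
  · omega
  · rfl

theorem pvRef_some_step (l : List Char) (q : Char) (i : Nat) (hi : i < l.length) :
    pvRef l (some q) i =
      pvRef l (if l[i]'hi = q ∧ PySem.List.pyGet? l ((i : Int) - 1) ≠ some '\\' then none else some q)
        (i + 1) := by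
  conv_lhs => unfold pvRef
  split
  · rfl
  · omega

theorem pvRef_none_step (l : List Char) (i : Nat) (hi : i < l.length) :
    pvRef l none i =
      if l[i]'hi = '"' ∨ l[i]'hi = '\'' then pvRef l (some (l[i]'hi)) (i + 1)
      else if l[i]'hi = '#' then i
      else pvRef l none (i + 1) := by
  conv_lhs => unfold pvRef
  split
  · rfl
  · omega

theorem pvRef_ge (l : List Char) (ins : Option Char) (i : Nat) (h : i ≤ l.length) : i ≤ pvRef l ins i := by
  unfold pvRef
  split
  · rename_i hi
    split
    · exact le_trans (by omega) (pvRef_ge l _ (i + 1) (by omega))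
    · split_ifs with h1 h2
      · exact le_trans (by omega) (pvRef_ge l _ (i + 1) (by omega))
      · exact le_refl _
      · exact le_trans (by omega) (pvRef_ge l _ (i + 1) (by omega))
  · omega
termination_by l.length - i

theorem pvRef_le (l : List Char) (ins : Option Char) (i : Nat) (h : i ≤ l.length) :
    pvRef l ins i ≤ l.length := by
  unfold pvRef
  split
  · rename_i hi
    split
    · exact pvRef_le l _ (i + 1) (by omega)
    · split_ifs with h1 h2
      · exact pvRef_le l _ (i + 1) (by omega)
      · omega
      · exact pvRef_le l _ (i + 1) (by omega)
  · exact le_refl _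
termination_by l.length - i

theorem take_drop_cons (l : List Char) (i m : Nat) (him : i < m) (hm : m ≤ l.length) :
    (l.take m).drop i = l[i]'(by omega) :: (l.take m).drop (i + 1) := by
  have hlen : i < (l.take m).length := by simp; omega
  rw [List.drop_eq_getElem_cons hlen]
  congr 1
  simp [List.getElem_take]

-- A's loop equals take (pvRef …) from position i.
theorem pvLoopA_eq (l : List Char) (code : List Char) (ins : Option Char) (i : Nat)
    (h : i ≤ l.length) :
    pvLoopA l code ins i = code ++ (l.take (pvRef l ins i)).drop i := by
  unfold pvLoopA pvRef
  split
  · rename_i hi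
    have step : ∀ ins' : Option Char,
        pvLoopA l (code ++ [l[i]]) ins' (i + 1) =
          code ++ (l.take (pvRef l ins' (i + 1))).drop i := by
      intro ins'
      rw [pvLoopA_eq l _ ins' (i + 1) (by omega)]
      have hge : i + 1 ≤ pvRef l ins' (i + 1) := pvRef_ge l ins' (i + 1) (by omega)
      have hle : pvRef l ins' (i + 1) ≤ l.length := pvRef_le l ins' (i + 1) (by omega)
      rw [take_drop_cons l i _ (by omega) hle]
      simp
    split
    · exact step _
    · split_ifs with h1 h2
      · exact step _
      · simp
      · exact step _
  · simp
    omega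
termination_by l.length - i

-- find specs
theorem pvFindFrom_some_get (l : List Char) (c : Char) (i m : Nat)
    (h : pvFindFrom l c i = some m) : l.getD m ' ' = c := by
  unfold pvFindFrom at h
  split at h
  · rename_i hi
    split at h
    · rename_i hc
      cases h
      simpa [List.getD, List.getElem?_eq_getElem hi] using hc
    · exact pvFindFrom_some_get l c (i + 1) m h
  · cases h
termination_by l.length - i

theorem pvFindFrom_some_min (l : List Char) (c : Char) (i m j : Nat)
    (h : pvFindFrom l c i = some m) (hj1 : i ≤ j) (hj2 : j < m) : l.getD j ' ' ≠ c := by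
  unfold pvFindFrom at h
  split at h
  · rename_i hi
    split at h
    · cases h; omega
    · rename_i hc
      rcases Nat.eq_or_lt_of_le hj1 with rfl | hlt
      · simpa [List.getD, List.getElem?_eq_getElem hi] using hc
      · exact pvFindFrom_some_min l c (i + 1) m j h (by omega) hj2
  · cases h
termination_by l.length - i

theorem pvFindFrom_none (l : List Char) (c : Char) (i j : Nat)
    (h : pvFindFrom l c i = none) (hj1 : i ≤ j) (hj2 : j < l.length) : l.getD j ' ' ≠ c := by
  unfold pvFindFrom at h
  split at h
  · rename_i hi
    split at h
    · cases h
    · rename_i hc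
      rcases Nat.eq_or_lt_of_le hj1 with rfl | hlt
      · simpa [List.getD, List.getElem?_eq_getElem hi] using hc
      · exact pvFindFrom_none l c (i + 1) j h (by omega) hj2
  · rename_i hi; omega
termination_by l.length - i

-- stepping pvRef in state none over a region with no special characters
theorem pvRef_none_skip (l : List Char) (i j : Nat) (hij : i ≤ j) (hj : j ≤ l.length)
    (hreg : ∀ m, i ≤ m → m < j → l.getD m ' ' ≠ '#' ∧ l.getD m ' ' ≠ '"' ∧ l.getD m ' ' ≠ '\'') :
    pvRef l none i = pvRef l none j := by
  rcases Nat.eq_or_lt_of_le hij with rfl | hlt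
  · rfl
  · have hi : i < l.length := by omega
    have hm := hreg i (le_refl _) hlt
    rw [show l.getD i ' ' = l[i]'hi from by simp [List.getD, List.getElem?_eq_getElem hi]] at hm
    rw [pvRef_none_step l i hi, if_neg (by tauto), if_neg hm.1]
    exact pvRef_none_skip l (i + 1) j hlt hj (fun m h1 h2 => hreg m (by omega) h2)
termination_by j - i

-- stepping pvRef in state (some q) over a region with no q
theorem pvRef_some_skip (l : List Char) (q : Char) (i j : Nat) (hij : i ≤ j) (hj : j ≤ l.length)
    (hreg : ∀ m, i ≤ m → m < j → l.getD m ' ' ≠ q) :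
    pvRef l (some q) i = pvRef l (some q) j := by
  rcases Nat.eq_or_lt_of_le hij with rfl | hlt
  · rfl
  · have hi : i < l.length := by omega
    have hm := hreg i (le_refl _) hlt
    rw [show l.getD i ' ' = l[i]'hi from by simp [List.getD, List.getElem?_eq_getElem hi]] at hm
    rw [pvRef_some_step l q i hi, if_neg (by tauto)]
    exact pvRef_some_skip l q (i + 1) j hlt hj (fun m h1 h2 => hreg m (by omega) h2)
termination_by j - i

-- in-string scan = skipClose
theorem pvRef_some_eq_skipClose (l : List Char) (q : Char) (k : Nat) (hk : k ≤ l.length) :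
    pvRef l (some q) k =
      match pvSkipClose l q k with
      | none => l.length
      | some m => pvRef l none (m + 1) := by
  rcases hf : pvFindFrom l q k with _ | m
  · have hs : pvSkipClose l q k = none := by rw [pvSkipClose_unfold, hf]
    rw [hs,
      pvRef_some_skip l q k l.length hk le_rfl (fun j h1 h2 => pvFindFrom_none l q k j hf h1 h2),
      pvRef_stop l _ _ le_rfl]
  · have hm := pvFindFrom_some_ge l q k m hf
    have hget : l.getD m ' ' = q := pvFindFrom_some_get l q k m hf
    have hgm : (l[m]'hm.2) = q := by
      simpa [List.getD, List.getElem?_eq_getElem hm.2] using hget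
    have hstep : pvRef l (some q) k = pvRef l (some q) m :=
      pvRef_some_skip l q k m hm.1 (by omega)
        (fun j h1 h2 => pvFindFrom_some_min l q k m j hf h1 h2)
    by_cases hesc : PySem.List.pyGet? l ((m : Int) - 1) = some '\\'
    · have hs : pvSkipClose l q k = pvSkipClose l q (m + 1) := by
        rw [pvSkipClose_unfold, hf]; simp [hesc]
      rw [hs, hstep, pvRef_some_step l q m hm.2, hgm, if_neg (by simp [hesc])]
      exact pvRef_some_eq_skipClose l q (m + 1) (by omega)
    · have hs : pvSkipClose l q k = some m := by
        rw [pvSkipClose_unfold, hf]; simp [hesc]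
      rw [hs, hstep, pvRef_some_step l q m hm.2, hgm, if_pos ⟨rfl, hesc⟩]
termination_by l.length - k
decreasing_by omega

-- quote-position spec
theorem pvMinQuote_spec (l : List Char) (pos : Nat) :
    pvMinQuote l pos ≤ l.length ∧
    (pvMinQuote l pos < l.length →
      l.getD (pvMinQuote l pos) ' ' = '"' ∨ l.getD (pvMinQuote l pos) ' ' = '\'') ∧
    (∀ m, pos ≤ m → m < pvMinQuote l pos → l.getD m ' ' ≠ '"' ∧ l.getD m ' ' ≠ '\'') := by
  unfold pvMinQuote
  rcases ha : pvFindFrom l '\'' pos with _ | a <;> rcases hb : pvFindFrom l '"' pos with _ | b <;>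
    simp only [ha, hb]
  · refine ⟨le_refl _, by omega, ?_⟩
    intro m h1 h2
    exact ⟨pvFindFrom_none l '"' pos m hb h1 h2, pvFindFrom_none l '\'' pos m ha h1 h2⟩
  · have hgb := pvFindFrom_some_ge l '"' pos b hb
    refine ⟨by omega, fun _ => Or.inl (pvFindFrom_some_get l '"' pos b hb), ?_⟩
    intro m h1 h2
    exact ⟨pvFindFrom_some_min l '"' pos b m hb h1 h2,
      pvFindFrom_none l '\'' pos m ha h1 (by omega)⟩
  · have hga := pvFindFrom_some_ge l '\'' pos a ha
    refine ⟨by omega, fun _ => Or.inr (pvFindFrom_some_get l '\'' pos a ha), ?_⟩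
    intro m h1 h2
    exact ⟨pvFindFrom_none l '"' pos m hb h1 (by omega),
      pvFindFrom_some_min l '\'' pos a m ha h1 h2⟩
  · have hga := pvFindFrom_some_ge l '\'' pos a ha
    have hgb := pvFindFrom_some_ge l '"' pos b hb
    refine ⟨by omega, ?_, ?_⟩
    · intro _
      rcases le_total a b with hab | hab
      · rw [min_eq_left hab]; exact Or.inr (pvFindFrom_some_get l '\'' pos a ha)
      · rw [min_eq_right hab]; exact Or.inl (pvFindFrom_some_get l '"' pos b hb)
    · intro m h1 h2
      exact ⟨pvFindFrom_some_min l '"' pos b m hb h1 (by omega),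
        pvFindFrom_some_min l '\'' pos a m ha h1 (by omega)⟩

-- '#'-position spec
theorem pvHash_spec (l : List Char) (pos : Nat) (hpos : pos ≤ l.length) :
    pos ≤ (pvFindFrom l '#' pos).getD l.length ∧
    (pvFindFrom l '#' pos).getD l.length ≤ l.length ∧
    ((pvFindFrom l '#' pos).getD l.length < l.length →
      l.getD ((pvFindFrom l '#' pos).getD l.length) ' ' = '#') ∧
    (∀ m, pos ≤ m → m < (pvFindFrom l '#' pos).getD l.length → l.getD m ' ' ≠ '#') := by
  rcases hf : pvFindFrom l '#' pos with _ | a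
  · refine ⟨by simp; omega, by simp, by simp, ?_⟩
    intro m h1 h2
    simp only [Option.getD_none] at h2
    exact pvFindFrom_none l '#' pos m hf h1 h2
  · have hg := pvFindFrom_some_ge l '#' pos a hf
    refine ⟨by simp; omega, by simp; omega, fun _ => by
      simpa using pvFindFrom_some_get l '#' pos a hf, ?_⟩
    intro m h1 h2
    simp only [Option.getD_some] at h2
    exact pvFindFrom_some_min l '#' pos a m hf h1 h2

theorem pvCutB_unfold (l : List Char) (pos : Nat) :
    pvCutB l pos =
      if pos < l.length then
        if (pvFindFrom l '#' pos).getD l.length < pvMinQuote l pos then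
          (pvFindFrom l '#' pos).getD l.length
        else if pvMinQuote l pos = l.length then l.length
        else
          match pvSkipClose l (l.getD (pvMinQuote l pos) ' ') (pvMinQuote l pos + 1) with
          | none => l.length
          | some k => pvCutB l (k + 1)
      else l.length := by
  conv_lhs => unfold pvCutB
  by_cases hpos : pos < l.length
  · rw [dif_pos hpos, if_pos hpos]
    split_ifs
    · rfl
    · rfl
    · split
      · rename_i heq; rw [heq]
      · rename_i k heq; rw [heq]
  · rw [dif_neg hpos, if_neg hpos]

-- main bridge: pvRef from state none equals Source B's outer loop
theorem pvRef_eq_pvCutB (l : List Char) (pos : Nat) (h : pos ≤ l.length) :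
    pvRef l none pos = pvCutB l pos := by
  rw [pvCutB_unfold]
  by_cases hpos : pos < l.length
  · rw [if_pos hpos]
    obtain ⟨hq1, hq2, hq3⟩ := pvMinQuote_spec l pos
    obtain ⟨hh0, hh1, hh2, hh3⟩ := pvHash_spec l pos (by omega)
    set hsh := (pvFindFrom l '#' pos).getD l.length with hdefh
    set q := pvMinQuote l pos with hdefq
    have hqpos : pos ≤ q := pvMinQuote_ge l pos (by omega)
    have hskip : pvRef l none pos = pvRef l none (min hsh q) := by
      apply pvRef_none_skip l pos (min hsh q) (by omega) (by omega)
      intro m h1 h2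
      exact ⟨hh3 m h1 (by omega), (hq3 m h1 (by omega)).1, (hq3 m h1 (by omega)).2⟩
    split_ifs with hlt hqn
    · -- hsh < q: cut at hsh
      have hhl : hsh < l.length := by omega
      have hc : (l[hsh]'hhl) = '#' := by
        simpa [List.getD, List.getElem?_eq_getElem hhl] using hh2 hhl
      rw [hskip, min_eq_left (le_of_lt hlt), pvRef_none_step l hsh hhl, hc,
        if_neg (by simp), if_pos rfl]
    · -- no quote or hash: scan to end
      rw [hskip, show min hsh q = l.length from by omega, pvRef_stop l _ _ le_rfl]
    · -- q < l.length: enter string at q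
      have hql : q < l.length := by omega
      have hquote := hq2 hql
      have hgq : (l[q]'hql) = l.getD q ' ' := by
        simp [List.getD, List.getElem?_eq_getElem hql]
      rw [hskip, min_eq_right (by omega), pvRef_none_step l q hql,
        if_pos (by rw [hgq]; tauto), hgq,
        pvRef_some_eq_skipClose l (l.getD q ' ') (q + 1) (by omega)]
      split
      · rfl
      · rename_i k hk
        have hkb := pvSkipClose_some_ge l (l.getD q ' ') (q + 1) k hk
        exact pvRef_eq_pvCutB l (k + 1) (by omega)
  · rw [if_neg hpos, pvRef_stop l _ _ (by omega)]
termination_by l.length - pos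
decreasing_by omega

-- ===== VERDICT (by name: the statement is the Claim_ definition above) =====
theorem remove_comments_from_code_line_spec : Claim_equal_remove_comments_from_code_line := by
  intro line _
  unfold Spec_remove_comments_from_code_line remove_comments_from_code_line remove_comments_from_code_line_alt
  rw [pvLoopA_eq line.toList [] none 0 (by omega)]
  rw [← pvRef_eq_pvCutB line.toList 0 (by omega)]
  simp
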